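-- pv_equiv track=rewrite | github.com/doobMM/hibari_tda | WK14/util.py | find_cycles_with_simul_intersection
-- ===== SOURCE A (Python) =====
-- def find_cycles_with_simul_intersection(cycles, notes_dict):
--     """
--     cycles 딕셔너리에서 notes_dict의 어떤 value와도 교집합 크기가 2 이상인 cycle을 찾고,
--     해당 cycle에 대해 notes_dict에서 몇 번 key와 교집합이 크게 나타나는지 출력합니다.
--
--     Args:
--         cycles: cycle을 나타내는 튜플의 집합입니다.
--         notes_dict: 각 key에 대한 음표(노트) 집합을 나타내는 딕셔너리입니다.
--
--     Returns:
--         notes_dict의 어떤 value와도 교집합 크기가 2 이상인 cycle의 리스트,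
--         그리고 각 cycle에 대해 교집합이 크게 나타나는 key 번호의 리스트를 담은 튜플입니다.
--     """
--     significant_cycles = []
--     intersection_keys = []
--
--     for cycle in cycles:
--         chord_keys = []  # 현재 cycle에 대한 key 번호 리스트
--
--         for chord_key, note_set in notes_dict.items():
--             intersection = set(cycle).intersection(note_set)  # cycle과 note_set의 교집합 계산
--
--             if len(intersection) >= 2:  # 교집합 크기가 2 이상이면
--                 chord_keys.append(chord_key)  # 해당 key 번호를 리스트에 추가
--
--         if chord_keys:  # cycle에 대해 교집합 크기가 2 이상인 key가 하나라도 있으면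
--             significant_cycles.append(cycle)  # 결과 리스트에 추가
--             intersection_keys.append(chord_keys)  # key 번호 리스트를 결과 리스트에 추가
--
--     return significant_cycles, intersection_keys
-- ===== SOURCE B (Python) =====
-- def find_cycles_with_simul_intersection(cycles, notes_dict):
--     # Inverted index: note element -> list of keys whose note set contains it (in dict order).
--     index = {}
--     for chord_key, note_set in notes_dict.items():
--         for e in dict.fromkeys(note_set):
--             index.setdefault(e, []).append(chord_key)
--     key_order = list(notes_dict.keys())
--
--     significant_cycles = []
--     intersection_keys = []
--     for cycle in cycles:
--         counts = {}
--         for e in dict.fromkeys(cycle):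
--             for k in index.get(e, ()):
--                 counts[k] = counts.get(k, 0) + 1
--         chord_keys = [k for k in key_order if counts.get(k, 0) >= 2]
--         if chord_keys:
--             significant_cycles.append(cycle)
--             intersection_keys.append(chord_keys)
--     return significant_cycles, intersection_keys
-- ===== Notes on version B (the rewrite author's own statement) =====
-- stated objective: faster
-- what changed: Replaces the per-cycle scan over every (key, note_set) pair with a set-intersection by a precomputed inverted index element->keys; each cycle only accumulates key hit-counts over its distinct elements' postings and collects keys with count>=2 in dict order.
import Mathlib
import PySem

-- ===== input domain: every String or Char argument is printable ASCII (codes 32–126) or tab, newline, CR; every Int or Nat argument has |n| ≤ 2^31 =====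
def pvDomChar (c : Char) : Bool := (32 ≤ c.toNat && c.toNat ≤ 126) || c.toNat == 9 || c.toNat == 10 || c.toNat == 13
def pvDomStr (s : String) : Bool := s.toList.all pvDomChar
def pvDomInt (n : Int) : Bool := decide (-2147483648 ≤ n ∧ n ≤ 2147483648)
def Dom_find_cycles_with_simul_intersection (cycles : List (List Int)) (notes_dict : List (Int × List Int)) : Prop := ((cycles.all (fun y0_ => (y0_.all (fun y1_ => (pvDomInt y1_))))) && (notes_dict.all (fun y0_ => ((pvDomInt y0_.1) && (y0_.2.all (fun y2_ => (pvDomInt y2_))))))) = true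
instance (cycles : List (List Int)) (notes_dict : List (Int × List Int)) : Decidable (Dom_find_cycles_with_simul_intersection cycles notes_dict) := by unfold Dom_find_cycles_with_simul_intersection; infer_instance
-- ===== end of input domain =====

-- B replaces A's per-cycle scan over all (key, note_set) pairs (a set intersection each) by a
-- precomputed inverted index element -> keys: per cycle it accumulates key hit-counts from the
-- distinct cycle elements' postings and keeps the keys with count >= 2, in dict order.

-- ===== PORT A =====
def find_cycles_with_simul_intersection (cycles : List (List Int)) (notes_dict : List (Int × List Int)) : List (List Int) × List (List Int) :=
  let d := PySem.Dict.ofList notes_dict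
  cycles.foldl (fun acc cycle =>
    let chord_keys : List Int := d.items.foldl (fun ck p =>
      let inter := PySem.Set.inter (PySem.Set.ofList cycle) p.2
      if 2 ≤ PySem.Set.len inter then ck ++ [p.1] else ck) []
    if chord_keys.isEmpty then acc else (acc.1 ++ [cycle], acc.2 ++ [chord_keys]))
    ([], [])

-- ===== PORT B =====
def find_cycles_with_simul_intersection_alt (cycles : List (List Int)) (notes_dict : List (Int × List Int)) : List (List Int) × List (List Int) :=
  let d := PySem.Dict.ofList notes_dict
  let index : PySem.Dict Int (List Int) :=
    d.items.foldl (fun idx p =>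
      (PySem.List.dedup p.2).foldl (fun idx e => idx.modify e [] (· ++ [p.1])) idx)
      PySem.Dict.empty
  let key_order := d.keys
  cycles.foldl (fun acc cycle =>
    let counts : PySem.Dict Int Int :=
      (PySem.List.dedup cycle).foldl (fun c e =>
        (index.getD e []).foldl (fun c k => c.modify k 0 (· + 1)) c)
        PySem.Dict.empty
    let chord_keys := key_order.filter (fun k => 2 ≤ counts.getD k 0)
    if chord_keys.isEmpty then acc else (acc.1 ++ [cycle], acc.2 ++ [chord_keys]))
    ([], [])

-- ===== PRECONDITION & SPEC =====
def Spec_find_cycles_with_simul_intersection (cycles : List (List Int)) (notes_dict : List (Int × List Int)) (out : List (List Int) × List (List Int)) : Prop := out = find_cycles_with_simul_intersection_alt cycles notes_dict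
instance (cycles : List (List Int)) (notes_dict : List (Int × List Int)) (out : List (List Int) × List (List Int)) : Decidable (Spec_find_cycles_with_simul_intersection cycles notes_dict out) := by unfold Spec_find_cycles_with_simul_intersection; infer_instance

-- ===== CLAIM (what is proved, stated in full; the proofs are below) =====
def Claim_equal_find_cycles_with_simul_intersection : Prop := ∀ (cycles : List (List Int)) (notes_dict : List (Int × List Int)), Dom_find_cycles_with_simul_intersection cycles notes_dict → Spec_find_cycles_with_simul_intersection cycles notes_dict (find_cycles_with_simul_intersection cycles notes_dict)

-- ===== LEMMAS AND PROOFS =====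

theorem pv_counts_getD (g : Int → List Int) (es : List Int) (c : PySem.Dict Int Int) (k : Int) :
    ((es.foldl (fun c e => (g e).foldl (fun c k => c.modify k 0 (· + 1)) c) c).getD k 0)
      = c.getD k 0 + ((es.map (fun e => ((g e).count k : Int))).sum) := by
  induction es generalizing c with
  | nil => simp
  | cons e t ih =>
    simp only [List.foldl_cons, List.map_cons, List.sum_cons, ih,
      PySem.Dict.getD_foldl_modify_add_one]
    ring

theorem pv_inner_index (ds : List Int) (idx : PySem.Dict Int (List Int)) (v x : Int) :
    ((ds.foldl (fun idx e => idx.modify e [] (· ++ [v])) idx).getD x [])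
      = idx.getD x [] ++ List.replicate (ds.count x) v := by
  induction ds generalizing idx with
  | nil => simp
  | cons a t ih =>
    simp only [List.foldl_cons, ih, PySem.Dict.getD_modify, List.count_cons]
    by_cases h : x = a
    · subst h
      simp [List.append_assoc, List.replicate_succ]
    · simp [h, Ne.symm h]

theorem pv_index_getD (l : List (Int × List Int)) (idx : PySem.Dict Int (List Int)) (x : Int) :
    ((l.foldl (fun idx p =>
        (PySem.List.dedup p.2).foldl (fun idx e => idx.modify e [] (· ++ [p.1])) idx) idx).getD x [])
      = idx.getD x [] ++ (l.filter (fun p => decide (x ∈ p.2))).map Prod.fst := by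
  induction l generalizing idx with
  | nil => simp
  | cons p t ih =>
    simp only [List.foldl_cons, ih, pv_inner_index, List.filter_cons]
    have hrep : List.replicate ((PySem.Set.ofList p.2).count x) p.1
        = if x ∈ p.2 then [p.1] else [] := by
      by_cases h : x ∈ p.2
      · rw [List.count_eq_one_of_mem (PySem.Set.nodup_ofList (xs := p.2))
          ((PySem.Set.mem_ofList (xs := p.2) (y := x)).2 h)]
        simp [h]
      · rw [List.count_eq_zero.2
          (fun hh => h ((PySem.Set.mem_ofList (xs := p.2) (y := x)).1 hh))]
        simp [h]
    by_cases h : x ∈ p.2 <;> simp [h, hrep, List.append_assoc]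

theorem pv_count_key (l : List (Int × List Int)) (hn : (l.map Prod.fst).Nodup)
    (k : Int) (ns : List Int) (hm : (k, ns) ∈ l) (e : Int) :
    (((l.filter (fun p => decide (e ∈ p.2))).map Prod.fst).count k)
      = if e ∈ ns then 1 else 0 := by
  induction l with
  | nil => cases hm
  | cons p t ih =>
    have hn1 : p.1 ∉ t.map Prod.fst := (List.nodup_cons.1 (by simpa using hn)).1
    have hn2 : (t.map Prod.fst).Nodup := (List.nodup_cons.1 (by simpa using hn)).2
    rcases List.mem_cons.1 hm with hh | ht
    · subst hh
      have hz : ((t.filter (fun p => decide (e ∈ p.2))).map Prod.fst).count k = 0 := by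
        refine List.count_eq_zero.2 (fun hc => hn1 ?_)
        obtain ⟨q, hq, hfq⟩ := List.mem_map.1 hc
        exact hfq ▸ List.mem_map.2 ⟨q, List.mem_of_mem_filter hq, rfl⟩
      rw [List.filter_cons]
      by_cases he : e ∈ ns <;> simp [he, hz]
    · have hpk : k ≠ p.1 := by
        intro hpk
        exact hn1 (hpk ▸ List.mem_map.2 ⟨(k, ns), ht, rfl⟩)
      rw [List.filter_cons]
      by_cases he : e ∈ p.2 <;> simp [he, Ne.symm hpk, ih hn2 ht]

theorem pv_chord (d : PySem.Dict Int (List Int)) (hnd : d.keys.Nodup) (cycle : List Int) :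
    d.items.foldl (fun ck p =>
      let inter := PySem.Set.inter (PySem.Set.ofList cycle) p.2
      if 2 ≤ PySem.Set.len inter then ck ++ [p.1] else ck) []
    = d.keys.filter (fun k => 2 ≤
        (((PySem.List.dedup cycle).foldl (fun c e =>
            ((d.items.foldl (fun idx p =>
                (PySem.List.dedup p.2).foldl (fun idx e => idx.modify e [] (· ++ [p.1])) idx)
              PySem.Dict.empty).getD e []).foldl (fun c k => c.modify k 0 (· + 1)) c)
          (PySem.Dict.empty : PySem.Dict Int Int)).getD k 0)) := by
  have hkeys : d.keys = d.items.map Prod.fst := rfl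
  -- LHS as a filter over items
  rw [PySem.List.foldl_append_ite
    (p := fun p : Int × List Int => 2 ≤ PySem.Set.len (PySem.Set.inter (PySem.Set.ofList cycle) p.2))
    (f := Prod.fst)]
  rw [List.nil_append]
  conv_lhs => rw [PySem.Dict.items_eq_map_keys d hnd ([] : List Int)]
  rw [List.filter_map, List.map_map]
  have hfst : (Prod.fst ∘ fun k => (k, d.getD k [])) = id := rfl
  rw [hfst, List.map_id]
  refine List.filter_congr (fun k hk => ?_)
  simp only [Function.comp_apply]
  -- value at k
  have hmem : (k, d.getD k []) ∈ d.items := by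
    rw [PySem.Dict.items_eq_map_keys d hnd ([] : List Int)]
    exact List.mem_map.2 ⟨k, hk, rfl⟩
  -- B's count at k
  have hcnt : (((PySem.List.dedup cycle).foldl (fun c e =>
        ((d.items.foldl (fun idx p =>
            (PySem.List.dedup p.2).foldl (fun idx e => idx.modify e [] (· ++ [p.1])) idx)
          PySem.Dict.empty).getD e []).foldl (fun c k => c.modify k 0 (· + 1)) c)
      PySem.Dict.empty).getD k 0)
      = ((PySem.List.dedup cycle).countP (fun x => decide (x ∈ d.getD k [])) : Int) := by
    rw [pv_counts_getD (g := fun e =>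
      ((d.items.foldl (fun idx p =>
          (PySem.List.dedup p.2).foldl (fun idx e => idx.modify e [] (· ++ [p.1])) idx)
        PySem.Dict.empty).getD e []))]
    have hpt : ∀ e : Int,
        (((d.items.foldl (fun idx p =>
            (PySem.List.dedup p.2).foldl (fun idx e => idx.modify e [] (· ++ [p.1])) idx)
          PySem.Dict.empty).getD e []).count k : Int)
        = if decide (e ∈ d.getD k []) = true then (1 : Int) else 0 := by
      intro e
      rw [pv_index_getD, PySem.Dict.getD_empty, List.nil_append,
        pv_count_key d.items (hkeys ▸ hnd) k (d.getD k []) hmem e]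
      by_cases he : e ∈ d.getD k [] <;> simp [he]
    calc _ = PySem.Dict.getD PySem.Dict.empty k 0 + ((PySem.List.dedup cycle).map
              (fun e => if decide (e ∈ d.getD k []) = true then (1 : Int) else 0)).sum := by
              rw [List.map_congr_left (fun e _ => hpt e)]
      _ = _ := by
              rw [PySem.List.sum_map_ite_one_zero (fun x => decide (x ∈ d.getD k []))]
              simp
  rw [hcnt]
  -- A's intersection length
  have hlen : PySem.Set.len (PySem.Set.inter (PySem.Set.ofList cycle) (d.getD k []))
      = ((PySem.List.dedup cycle).countP (fun x => decide (x ∈ d.getD k [])) : Int) := by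
    simp [PySem.Set.len, PySem.Set.inter, PySem.List.dedup, List.countP_eq_length_filter]
  rw [hlen]

-- ===== VERDICT (by name: the statement is the Claim_ definition above) =====
theorem find_cycles_with_simul_intersection_spec : Claim_equal_find_cycles_with_simul_intersection := by
  intro cycles notes_dict _
  unfold Spec_find_cycles_with_simul_intersection
  simp only [find_cycles_with_simul_intersection, find_cycles_with_simul_intersection_alt]
  exact PySem.List.foldl_congr_mem cycles _ _ ([], []) (fun acc x _ => by
    rw [pv_chord (PySem.Dict.ofList notes_dict) (PySem.Dict.nodup_keys_ofList notes_dict) x])
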